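-- pv_equiv track=rewrite | github.com/Veggiess/AI-Doc-Reader | src/inference.py | _process_entities
-- ===== SOURCE A (Python) =====
-- from collections import defaultdict
--
-- def _process_entities(words, predictions):
--     """Convert model predictions to structured data"""
--     entities = defaultdict(list)
--     current_entity = None
--
--     for word, label in zip(words, predictions):
--         if label.startswith("B-"):
--             current_entity = label[2:]
--             entities[current_entity].append(word)
--         elif label.startswith("I-") and current_entity == label[2:]:
--             entities[current_entity][-1] += " " + word
--         else:
--             current_entity = None
--
--     return {
--         "name": " ".join(entities.get("NAME", [])),
--         "id_number": " ".join(entities.get("ID", [])),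
--         "date_of_birth": " ".join(entities.get("DOB", []))
--     }
-- ===== SOURCE B (Python) =====
-- def _process_entities(words, predictions):
--     """Convert model predictions to structured data"""
--     pairs = list(zip(words, predictions))
--     spans = []  # ordered (entity_type, span_string) pairs
--     i, n = 0, len(pairs)
--     while i < n:
--         word, label = pairs[i]
--         i += 1
--         if label.startswith("B-"):
--             t = label[2:]
--             suffix = ""
--             while i < n and pairs[i][1] == "I-" + t:
--                 suffix += " " + pairs[i][0]
--                 i += 1
--             spans.append((t, word + suffix))
--
--     def joined(t):
--         return " ".join(s for ty, s in spans if ty == t)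
--
--     return {
--         "name": joined("NAME"),
--         "id_number": joined("ID"),
--         "date_of_birth": joined("DOB"),
--     }
-- ===== Notes on version B (the rewrite author's own statement) =====
-- stated objective: alternative
-- what changed: Replaces A's reset-flag state machine mutating the last element of a defaultdict-of-lists with a start-detection traversal: each 'B-' start spawns an inner run-extension loop consuming the matching 'I-' tags into one span string, spans are collected as ordered (type, span) pairs and joined per field at the end.
import Mathlib
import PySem

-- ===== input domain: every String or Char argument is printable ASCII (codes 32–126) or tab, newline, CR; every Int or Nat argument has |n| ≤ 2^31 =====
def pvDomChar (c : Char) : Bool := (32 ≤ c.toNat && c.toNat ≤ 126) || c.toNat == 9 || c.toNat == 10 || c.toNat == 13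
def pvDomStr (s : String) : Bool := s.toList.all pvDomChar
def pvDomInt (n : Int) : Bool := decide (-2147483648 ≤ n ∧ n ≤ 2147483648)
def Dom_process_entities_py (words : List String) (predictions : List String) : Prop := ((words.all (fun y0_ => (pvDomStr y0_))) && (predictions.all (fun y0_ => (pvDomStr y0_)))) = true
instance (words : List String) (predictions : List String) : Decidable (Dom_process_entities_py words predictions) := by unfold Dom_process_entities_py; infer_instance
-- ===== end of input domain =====

-- B replaces A's reset-flag state machine (defaultdict of span lists, last element mutated in
-- place) by a start-detection traversal: each "B-" start spawns an inner run-extension loop that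
-- consumes the matching "I-" tags into one span string; spans are collected as ordered
-- (type, span) pairs and joined per output field at the end.  Objective: alternative.

-- ===== PORT A =====
-- one step of A's loop over zip(words, predictions); state = (entities, current_entity)
def pvStepA (st : PySem.Dict String (List String) × Option String) (wl : String × String) :
    PySem.Dict String (List String) × Option String :=
  if PySem.Str.startswith wl.2 "B-" then
    let t := PySem.Str.slice wl.2 (some 2) none
    (st.1.insert t (st.1.getD t [] ++ [wl.1]), some t)
  else if PySem.Str.startswith wl.2 "I-" && st.2 == some (PySem.Str.slice wl.2 (some 2) none) then
    match st.2 with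
    | some c =>
      let xs := st.1.getD c []
      -- entities[current][-1] += " " + word; xs is provably nonempty when this branch runs,
      -- so the getLast? default "" is never used (Python would raise IndexError only on empty xs)
      (st.1.insert c (xs.dropLast ++ [xs.getLast?.getD "" ++ " " ++ wl.1]), st.2)
    | none => (st.1, none)   -- unreachable: the guard requires st.2 = some _
  else (st.1, none)

def process_entities_py (words : List String) (predictions : List String) : List (String × String) :=
  let fin := (words.zip predictions).foldl pvStepA (PySem.Dict.empty, none)
  let entities := fin.1
  [("name", PySem.Str.join " " (entities.getD "NAME" [])),
   ("id_number", PySem.Str.join " " (entities.getD "ID" [])),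
   ("date_of_birth", PySem.Str.join " " (entities.getD "DOB" []))]

-- ===== PORT B =====
-- inner while loop of Source B: extend a run of labels equal to "I-" + t, returning the
-- accumulated " "-prefixed suffix and the unconsumed rest of the pair list
def pvTake (t : String) : List (String × String) → String × List (String × String)
  | [] => ("", [])
  | (w, l) :: rest =>
    if l == "I-" ++ t then
      let p := pvTake t rest
      (" " ++ w ++ p.1, p.2)
    else ("", (w, l) :: rest)

theorem pvTake_rest_length (t : String) (ps : List (String × String)) :
    (pvTake t ps).2.length ≤ ps.length := by
  induction ps with
  | nil => simp [pvTake]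
  | cons hd tl ih =>
    obtain ⟨w, l⟩ := hd
    simp only [pvTake]
    split
    · exact Nat.le_succ_of_le ih
    · simp

-- outer while loop of Source B: collect ordered (type, span) pairs
def pvScan : List (String × String) → List (String × String)
  | [] => []
  | (w, l) :: rest =>
    if PySem.Str.startswith l "B-" then
      let t := PySem.Str.slice l (some 2) none
      let p := pvTake t rest
      (t, w ++ p.1) :: pvScan p.2
    else pvScan rest
termination_by ps => ps.length
decreasing_by
  · have := pvTake_rest_length (PySem.Str.slice l (some 2) none) rest
    simp; omega
  · simp

-- joined(t) of Source B
def pvJoined (t : String) (spans : List (String × String)) : String :=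
  PySem.Str.join " " ((spans.filter (fun p => p.1 == t)).map (·.2))

def process_entities_py_alt (words : List String) (predictions : List String) : List (String × String) :=
  let spans := pvScan (words.zip predictions)
  [("name", pvJoined "NAME" spans),
   ("id_number", pvJoined "ID" spans),
   ("date_of_birth", pvJoined "DOB" spans)]

-- ===== PRECONDITION & SPEC =====
def Spec_process_entities_py (words : List String) (predictions : List String) (out : List (String × String)) : Prop := out = process_entities_py_alt words predictions
instance (words : List String) (predictions : List String) (out : List (String × String)) : Decidable (Spec_process_entities_py words predictions out) := by unfold Spec_process_entities_py; infer_instance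

-- ===== CLAIM (what is proved, stated in full; the proofs are below) =====
def Claim_equal_process_entities_py : Prop := ∀ (words : List String) (predictions : List String), Dom_process_entities_py words predictions → Spec_process_entities_py words predictions (process_entities_py words predictions)

-- ===== LEMMAS AND PROOFS =====

-- slicing from index 2 is dropping two characters
theorem pvSlice2_toList (l : String) :
    (PySem.Str.slice l (some 2) none).toList = l.toList.drop 2 := by
  simp [PySem.Str.toList_slice, PySem.Chars.slice_eq_listSlice, pysem]

-- a label satisfies A's "I-"-continuation test for c exactly when it is the string "I-" ++ c
theorem pvLabel_I_iff (l c : String) :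
    (PySem.Str.startswith l "I-" && (some c == some (PySem.Str.slice l (some 2) none))) = true
      ↔ l = "I-" ++ c := by
  constructor
  · rintro h
    simp only [Bool.and_eq_true, beq_iff_eq, Option.some.injEq] at h
    obtain ⟨h1, h2⟩ := h
    have hpre : "I-".toList <+: l.toList :=
      (PySem.Chars.startswith_iff (s := l.toList) (p := "I-".toList)).mp (by simpa using h1)
    obtain ⟨tail, htail⟩ := hpre
    apply String.toList_inj.mp
    have hdrop : l.toList.drop 2 = tail := by rw [← htail]; rfl
    have hc : c.toList = tail := by rw [h2, pvSlice2_toList, hdrop]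
    simp [← htail, hc]
  · rintro rfl
    have hsw : PySem.Str.startswith ("I-" ++ c) "I-" = true := by
      simp only [PySem.Str.startswith_eq]
      exact (PySem.Chars.startswith_iff _ _).mpr ⟨c.toList, by simp⟩
    have hslice : PySem.Str.slice ("I-" ++ c) (some 2) none = c := by
      apply String.toList_inj.mp
      rw [pvSlice2_toList]
      simp
    simp only [Bool.and_eq_true, beq_iff_eq, Option.some.injEq]
    exact ⟨hsw, hslice.symm⟩

-- "I-" ++ c never starts with "B-"
theorem pvNotB (c : String) : PySem.Str.startswith ("I-" ++ c) "B-" = false := by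
  by_contra hB
  have hB' : PySem.Str.startswith ("I-" ++ c) "B-" = true := by
    revert hB; cases PySem.Str.startswith ("I-" ++ c) "B-" <;> simp
  have hpre := (PySem.Chars.startswith_iff (s := ("I-" ++ c).toList) (p := "B-".toList)).mp
    (by simpa using hB')
  obtain ⟨tail, htail⟩ := hpre
  have h2 : ("I-" ++ c).toList = 'I' :: '-' :: c.toList := by simp
  rw [h2] at htail
  have h3 : 'B' = 'I' := by
    have := congrArg (fun xs => xs.head?) htail
    simpa using this
  exact absurd h3 (by decide)

-- when the head of the remaining pairs is not the continuation "I-" ++ c, the fold from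
-- current = some c produces the same entities dict as the fold from current = none
theorem foldA_some_of_head_not_I (c : String) (e : PySem.Dict String (List String))
    (rest : List (String × String))
    (h : ∀ w l tl, rest = (w, l) :: tl → l ≠ "I-" ++ c) :
    (rest.foldl pvStepA (e, some c)).1 = (rest.foldl pvStepA (e, none)).1 := by
  cases rest with
  | nil => rfl
  | cons hd tl =>
    obtain ⟨w, l⟩ := hd
    have hne : l ≠ "I-" ++ c := h w l tl rfl
    simp only [List.foldl_cons]
    have hsame : pvStepA (e, some c) (w, l) = pvStepA (e, none) (w, l) := by
      simp only [pvStepA]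
      split
      · rfl
      · have hcond : (PySem.Str.startswith l "I-" && (some c == some (PySem.Str.slice l (some 2) none))) = false := by
          by_contra hc
          exact hne ((pvLabel_I_iff l c).mp (by
            revert hc
            cases (PySem.Str.startswith l "I-" && (some c == some (PySem.Str.slice l (some 2) none))) <;> simp))
        have hcondN : (PySem.Str.startswith l "I-" && ((none : Option String) == some (PySem.Str.slice l (some 2) none))) = false := by
          simp
        simp only [hcond, hcondN]
        rfl
    rw [hsame]

-- the run lemma: from state current = some c with entities[c] = pre ++ [w], A's fold consumes
-- exactly the pvTake run, merging its words into the last span element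
theorem foldA_run (c : String) : ∀ (rest : List (String × String))
    (e : PySem.Dict String (List String)) (pre : List String) (w : String),
    (rest.foldl pvStepA (e.insert c (pre ++ [w]), some c)).1
      = ((pvTake c rest).2.foldl pvStepA (e.insert c (pre ++ [w ++ (pvTake c rest).1]), none)).1 := by
  intro rest
  induction rest with
  | nil => intro e pre w; simp [pvTake]
  | cons hd tl ih =>
    intro e pre w
    obtain ⟨w2, l⟩ := hd
    by_cases hl : l = "I-" ++ c
    · subst hl
      have hcond := (pvLabel_I_iff ("I-" ++ c) c).mpr rfl
      have hgetD : (e.insert c (pre ++ [w])).getD c [] = pre ++ [w] :=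
        PySem.Dict.getD_insert_self e c (pre ++ [w]) []
      have hlast : (pre ++ [w]).getLast?.getD "" = w := by
        simp [List.getLast?_append]
      have hstep : (pvStepA (e.insert c (pre ++ [w]), some c) (w2, "I-" ++ c)) =
          (e.insert c (pre ++ [w ++ " " ++ w2]), some c) := by
        simp only [pvStepA, pvNotB c, Bool.false_eq_true, if_false, hcond, if_true]
        rw [show ((e.insert c (pre ++ [w])).getD c []) = pre ++ [w] from hgetD]
        rw [show (pre ++ [w]).dropLast = pre by simp, hlast, PySem.Dict.insert_insert_self]
      have htake : pvTake c ((w2, "I-" ++ c) :: tl)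
          = (" " ++ w2 ++ (pvTake c tl).1, (pvTake c tl).2) := by
        simp [pvTake]
      rw [htake]
      simp only [List.foldl_cons, hstep]
      rw [ih e pre (w ++ " " ++ w2)]
      have hassoc : (w ++ " " ++ w2) ++ (pvTake c tl).1 = w ++ (" " ++ w2 ++ (pvTake c tl).1) := by
        simp [String.append_assoc]
      rw [hassoc]
    · have htake : pvTake c ((w2, l) :: tl) = ("", (w2, l) :: tl) := by
        have hbeq : (l == "I-" ++ c) = false := by simpa using hl
        simp [pvTake, hbeq]
      rw [htake]
      have hnil : w ++ "" = w := by simp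
      simp only [hnil]
      exact foldA_some_of_head_not_I c (e.insert c (pre ++ [w])) ((w2, l) :: tl)
        (by rintro w' l' tl' heq; injection heq with h1 h2; injection h1 with _ hl'; subst hl'; exact hl)

-- the scan lemma: from current = none, A's final span list for key t is the initial one
-- followed by B's span strings of type t
theorem foldA_scan (t : String) : ∀ (n : Nat) (pairs : List (String × String)),
    pairs.length ≤ n → ∀ (e : PySem.Dict String (List String)),
    ((pairs.foldl pvStepA (e, none)).1).getD t []
      = e.getD t [] ++ ((pvScan pairs).filter (fun p => p.1 == t)).map (·.2) := by
  intro n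
  induction n with
  | zero =>
    intro pairs hlen e
    have : pairs = [] := List.length_eq_zero_iff.mp (Nat.le_zero.mp hlen)
    subst this
    simp [pvScan]
  | succ n ih =>
    intro pairs hlen e
    cases pairs with
    | nil => simp [pvScan]
    | cons hd rest =>
      obtain ⟨w, l⟩ := hd
      by_cases hB : PySem.Str.startswith l "B-" = true
      · have hstep : pvStepA (e, none) (w, l)
            = (e.insert (PySem.Str.slice l (some 2) none)
                (e.getD (PySem.Str.slice l (some 2) none) [] ++ [w]),
               some (PySem.Str.slice l (some 2) none)) := by
          simp only [pvStepA, hB, if_true]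
        set t0 := PySem.Str.slice l (some 2) none with ht0
        simp only [List.foldl_cons, hstep]
        rw [foldA_run t0 rest e (e.getD t0 []) w]
        have hlen' : (pvTake t0 rest).2.length ≤ n := by
          have := pvTake_rest_length t0 rest
          simp at hlen
          omega
        rw [ih (pvTake t0 rest).2 hlen' _]
        have hscan : pvScan ((w, l) :: rest)
            = (t0, w ++ (pvTake t0 rest).1) :: pvScan (pvTake t0 rest).2 := by
          rw [pvScan]
          simp only [hB, if_true]
          rfl
        rw [hscan]
        by_cases ht : t0 = t
        · subst ht
          rw [PySem.Dict.getD_insert_self]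
          simp [List.append_assoc]
        · have hbeq : (t0 == t) = false := by simpa using ht
          rw [PySem.Dict.getD_insert_of_ne]
          · simp [hbeq]
          · exact fun h => ht h.symm
      · have hB' : PySem.Str.startswith l "B-" = false := by
          revert hB; cases PySem.Str.startswith l "B-" <;> simp
        have hstep : pvStepA (e, none) (w, l) = (e, none) := by
          have hcondN : (PySem.Str.startswith l "I-" && ((none : Option String) == some (PySem.Str.slice l (some 2) none))) = false := by
            simp
          simp only [pvStepA, hB', hcondN]
          rfl
        have hscan : pvScan ((w, l) :: rest) = pvScan rest := by
          rw [pvScan]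
          simp only [hB', Bool.false_eq_true, if_false]
        simp only [List.foldl_cons, hstep, hscan]
        exact ih rest (by simp at hlen; omega) e

-- entities is initially empty
theorem pvEmpty_getD (t : String) :
    (PySem.Dict.empty : PySem.Dict String (List String)).getD t [] = [] := by
  simp [PySem.Dict.getD, PySem.Dict.get?, PySem.Dict.empty]

-- the per-field result of A equals B's joined(t)
theorem pvField_eq (t : String) (pairs : List (String × String)) :
    PySem.Str.join " " (((pairs.foldl pvStepA (PySem.Dict.empty, none)).1).getD t [])
      = pvJoined t (pvScan pairs) := by
  rw [foldA_scan t pairs.length pairs le_rfl PySem.Dict.empty, pvEmpty_getD]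
  simp [pvJoined]

-- ===== VERDICT (by name: the statement is the Claim_ definition above) =====
theorem process_entities_py_spec : Claim_equal_process_entities_py := by
  intro words predictions _
  unfold Spec_process_entities_py process_entities_py process_entities_py_alt
  simp only []
  rw [pvField_eq "NAME" (words.zip predictions), pvField_eq "ID" (words.zip predictions),
    pvField_eq "DOB" (words.zip predictions)]
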